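-- pv_equiv track=rewrite | github.com/liskos/larchen | variant_12/22.py | f
-- ===== SOURCE A (Python) =====
-- def f(x):
--     a = 0
--     b = 1
--     while x > 0:
--         a = a + 1
--         b = b * (x%9)
--         x = x//9
--     return a,b
-- ===== SOURCE B (Python) =====
-- def f(x):
--     p = 1
--     n = 0
--     while p <= x:
--         p *= 9
--         n += 1
--     b = 1
--     r = x
--     while p > 1:
--         p //= 9
--         b *= r // p
--         r %= p
--     return n, b
-- ===== Notes on version B (the rewrite author's own statement) =====
-- stated objective: alternative
-- what changed: B first finds the digit count by repeatedly multiplying an accumulator by nine until it exceeds x, then extracts the digits most-significant first by dividing and reducing the remainder by the shrinking precomputed powers, instead of A's single least-significant-first loop of mod and floor division by nine.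
import Mathlib
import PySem

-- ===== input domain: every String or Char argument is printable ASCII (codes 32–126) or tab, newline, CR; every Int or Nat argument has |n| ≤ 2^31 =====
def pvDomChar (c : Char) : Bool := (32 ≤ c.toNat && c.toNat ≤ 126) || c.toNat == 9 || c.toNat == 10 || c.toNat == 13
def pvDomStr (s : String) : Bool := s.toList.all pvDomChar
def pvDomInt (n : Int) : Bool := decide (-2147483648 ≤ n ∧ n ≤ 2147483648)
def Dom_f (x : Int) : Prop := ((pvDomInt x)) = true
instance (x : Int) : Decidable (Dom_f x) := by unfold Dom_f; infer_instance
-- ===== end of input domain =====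

-- B finds the digit count by growing powers of 9, then extracts digits MOST-significant first
-- by dividing by the shrinking powers, instead of A's fused LSB-first mod/div loop;
-- objective: alternative algorithm (different traversal order), same cost.

-- ===== PORT A =====
-- A's while loop: running count a and running product b, LSB-first via x%9, x//9.
def fLoop (x a b : Int) : Int × Int :=
  if 0 < x then
    fLoop (PySem.Int.floordiv x 9) (a + 1) (b * PySem.Int.mod x 9)
  else (a, b)
termination_by x.toNat
decreasing_by
  rw [PySem.Int.floordiv_eq_ediv_of_pos (by omega : (0:Int) < 9)]
  omega

def f (x : Int) : Int × Int := fLoop x 0 1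

-- ===== PORT B =====
-- B's first loop: grow p through powers of 9 (counting in n) until p > x.
-- ('0 < p' is a totality guard only: p starts at 1 and is only ever multiplied by 9.)
def growPow (x p n : Int) : Int × Int :=
  if 0 < p ∧ p ≤ x then growPow x (p * 9) (n + 1) else (p, n)
termination_by (x + 1 - p).toNat
decreasing_by omega

-- B's second loop: peel digits most-significant first, dividing by the shrinking power p.
def msbProd (p b r : Int) : Int :=
  if 1 < p then
    msbProd (PySem.Int.floordiv p 9) (b * PySem.Int.floordiv r (PySem.Int.floordiv p 9))
      (PySem.Int.mod r (PySem.Int.floordiv p 9))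
  else b
termination_by p.toNat
decreasing_by
  rw [PySem.Int.floordiv_eq_ediv_of_pos (by omega : (0:Int) < 9)]
  omega

def f_alt (x : Int) : Int × Int :=
  let pn := growPow x 1 0
  (pn.2, msbProd pn.1 1 x)

-- ===== PRECONDITION & SPEC =====
def Spec_f (x : Int) (out : Int × Int) : Prop := out = f_alt x
instance (x : Int) (out : Int × Int) : Decidable (Spec_f x out) := by unfold Spec_f; infer_instance

-- ===== CLAIM =====
def Claim_equal_f : Prop := ∀ (x : Int), Dom_f x → Spec_f x (f x)

-- ===== LEMMAS AND PROOFS =====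

-- proof-only helper: the base-9 digit list of x, least significant first
def digits9 (x : Int) : List Int :=
  if 0 < x then PySem.Int.mod x 9 :: digits9 (PySem.Int.floordiv x 9) else []
termination_by x.toNat
decreasing_by
  rw [PySem.Int.floordiv_eq_ediv_of_pos (by omega : (0:Int) < 9)]
  omega

-- proof-only helper: product of the n low base-9 digits of r (zero-padded), LSB first
def ppad : Nat → Int → Int
  | 0, _ => 1
  | n + 1, r => (r % 9) * ppad n (r / 9)

theorem fLoop_eq_digits9 (x a b : Int) :
    fLoop x a b = (a + (digits9 x).length, b * (digits9 x).prod) := by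
  induction x using digits9.induct generalizing a b with
  | case1 x hx ih =>
    rw [fLoop, digits9]
    simp only [hx, if_pos]
    rw [ih]
    simp [List.prod_cons]
    constructor
    · omega
    · ring
  | case2 x hx =>
    rw [fLoop, digits9]
    simp [hx]

theorem digits9_lt (x : Int) : x < 9 ^ (digits9 x).length := by
  induction x using digits9.induct with
  | case1 x hx ih =>
    rw [digits9]
    simp only [hx, if_pos, List.length_cons]
    have h9 : (0:Int) < 9 := by omega
    have hd := PySem.Int.floordiv_mul_add_mod x 9
    have hm := PySem.Int.mod_lt x h9
    have hm0 := PySem.Int.mod_nonneg x h9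
    rw [pow_succ]
    nlinarith [ih, pow_pos (show (0:Int) < 9 by omega) (digits9 (PySem.Int.floordiv x 9)).length]
  | case2 x hx =>
    rw [digits9]
    simp only [hx, if_false, List.length_nil, pow_zero]
    omega

theorem ppad_len (x : Int) : ppad (digits9 x).length x = (digits9 x).prod := by
  induction x using digits9.induct with
  | case1 x hx ih =>
    rw [digits9]
    simp only [hx, if_pos, List.length_cons, List.prod_cons]
    rw [ppad]
    rw [← PySem.Int.mod_eq_emod_of_pos (by omega : (0:Int) < 9),
        ← PySem.Int.floordiv_eq_ediv_of_pos (by omega : (0:Int) < 9), ih]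
  | case2 x hx =>
    rw [digits9]
    simp [hx, ppad]

theorem growPow_eq (x p n : Int) : 0 < p →
    growPow x p n =
      (p * 9 ^ (digits9 (PySem.Int.floordiv x p)).length,
       n + (digits9 (PySem.Int.floordiv x p)).length) := by
  induction p, n using growPow.induct x with
  | case1 p n h ih =>
    intro hp
    rw [growPow]
    simp only [h]
    rw [ih (by omega)]
    have h9 : (0:Int) < 9 := by omega
    have key : PySem.Int.floordiv x (p * 9) = PySem.Int.floordiv (PySem.Int.floordiv x p) 9 := by
      rw [PySem.Int.floordiv_eq_ediv_of_pos (by positivity),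
          PySem.Int.floordiv_eq_ediv_of_pos hp,
          PySem.Int.floordiv_eq_ediv_of_pos h9,
          Int.ediv_ediv_of_nonneg (by omega : (0:Int) ≤ p)]
    have hpos : 0 < PySem.Int.floordiv x p := by
      rw [PySem.Int.floordiv_eq_ediv_of_pos hp]
      have := (Int.le_ediv_iff_mul_le hp (a := 1) (b := x)).2 (by omega)
      omega
    rw [key]
    conv_rhs => rw [digits9]
    simp only [hpos, if_pos, and_self, List.length_cons]
    rw [Prod.mk.injEq]
    constructor
    · rw [pow_succ]; ring
    · push_cast; ring
  | case2 p n h =>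
    intro hp
    rw [growPow]
    simp only [h, if_false]
    have hxp : x < p := by
      by_contra hc
      exact h ⟨hp, by omega⟩
    have hz : digits9 (PySem.Int.floordiv x p) = [] := by
      rw [digits9, if_neg]
      rw [PySem.Int.floordiv_eq_ediv_of_pos hp]
      by_cases hx0 : 0 ≤ x
      · rw [Int.ediv_eq_zero_of_lt hx0 hxp]; omega
      · have := Int.ediv_neg_of_neg_of_pos (by omega : x < 0) hp
        omega
    rw [hz]
    simp

theorem modDivSwap (p r : Int) : (r % (p * 9)) / 9 = (r / 9) % p := by
  have h1 : r / (p * 9) = r / 9 / p := by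
    rw [mul_comm, ← Int.ediv_ediv_of_nonneg (show (0:Int) ≤ 9 by omega)]
  rw [Int.emod_def, h1]
  have h2 : r - p * 9 * (r / 9 / p) = r + (-(p * (r / 9 / p))) * 9 := by ring
  rw [h2, Int.add_mul_ediv_right _ _ (by omega : (9:Int) ≠ 0), Int.emod_def]
  ring

theorem peel (n : Nat) : ∀ (r : Int), 0 ≤ r → r < 9 ^ (n + 1) →
    (r / 9 ^ n) * ppad n (r % 9 ^ n) = ppad (n + 1) r := by
  induction n with
  | zero =>
    intro r h0 h1
    have h1' : r < 9 := by simpa using h1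
    simp only [pow_zero, Int.ediv_one, ppad]
    rw [Int.emod_eq_of_lt h0 h1']
  | succ n ih =>
    intro r h0 h1
    have h9 : (0:Int) < 9 := by omega
    have hpow : (0:Int) < 9 ^ (n + 1) := by positivity
    have e1 : (r % 9 ^ (n + 1)) % 9 = r % 9 :=
      Int.emod_emod_of_dvd r ⟨9 ^ n, by rw [pow_succ]; ring⟩
    have e2 : (r % 9 ^ (n + 1)) / 9 = (r / 9) % 9 ^ n := by
      rw [pow_succ]; exact modDivSwap (9 ^ n) r
    have e3 : r / 9 ^ (n + 1) = r / 9 / 9 ^ n := by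
      rw [Int.ediv_ediv_of_nonneg (show (0:Int) ≤ 9 by omega), ← pow_succ']
    have hb1 : 0 ≤ r / 9 := Int.ediv_nonneg h0 (by omega)
    have hb2 : r / 9 < 9 ^ (n + 1) := by
      have hd := Int.mul_ediv_add_emod r 9
      have hm := Int.emod_nonneg r (by omega : (9:Int) ≠ 0)
      rw [pow_succ] at h1
      nlinarith
    conv_rhs => rw [ppad]
    rw [← ih (r / 9) hb1 hb2]
    conv_lhs => rw [ppad]
    rw [e1, e2, e3]
    ring

theorem msbProd_pow (n : Nat) : ∀ (b r : Int), 0 ≤ r → r < 9 ^ n →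
    msbProd (9 ^ n) b r = b * ppad n r := by
  induction n with
  | zero =>
    intro b r _ _
    rw [msbProd]
    simp [ppad]
  | succ n ih =>
    intro b r h0 h1
    have h9 : (0:Int) < 9 := by omega
    have hpow : (0:Int) < 9 ^ n := by positivity
    have hgt : (1:Int) < 9 ^ (n + 1) := by
      calc (1:Int) < 9 := by omega
        _ ≤ 9 ^ (n + 1) := le_self_pow₀ (by omega) (by omega)
    have hdiv : PySem.Int.floordiv ((9:Int) ^ (n + 1)) 9 = 9 ^ n := by
      rw [PySem.Int.floordiv_eq_ediv_of_pos h9, pow_succ,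
          Int.mul_ediv_cancel _ (by omega : (9:Int) ≠ 0)]
    rw [msbProd]
    simp only [hgt, if_pos, hdiv]
    rw [PySem.Int.floordiv_eq_ediv_of_pos hpow, PySem.Int.mod_eq_emod_of_pos hpow]
    rw [ih (b * (r / 9 ^ n)) (r % 9 ^ n)
          (Int.emod_nonneg r (by omega)) (Int.emod_lt_of_pos r hpow)]
    rw [mul_assoc, peel n r h0 h1]

-- ===== VERDICT =====
theorem f_spec : Claim_equal_f := by
  intro x _
  unfold Spec_f f f_alt
  rw [fLoop_eq_digits9]
  have h1 : PySem.Int.floordiv x 1 = x := by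
    rw [PySem.Int.floordiv_eq_ediv_of_pos (by omega : (0:Int) < 1), Int.ediv_one]
  have hg := growPow_eq x 1 0 (by omega)
  rw [h1] at hg
  simp only [hg, one_mul, zero_add]
  rcases le_or_gt x 0 with hx | hx
  · have hz : digits9 x = [] := by rw [digits9, if_neg (by omega)]
    rw [hz]
    simp only [List.length_nil, List.prod_nil, pow_zero]
    rw [msbProd]
    norm_num
  · rw [msbProd_pow _ 1 x (by omega) (digits9_lt x), one_mul, ppad_len]
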